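-- pv_equiv track=rewrite | github.com/jcn-gh/code | Python/manual_incrementing_matrix.py | manual_incrementing_matrix
-- ===== SOURCE A (Python) =====
-- def manual_incrementing_matrix(n):
--     matrix = [[None for _ in range(n)] for _ in range(n)]
--     counter = 1
--     for idx, el in enumerate(matrix):
--         for nested_idx, nested_el in enumerate(el):
--             matrix[idx][nested_idx] = counter + nested_idx
--         counter += 1
--     return matrix
-- ===== SOURCE B (Python) =====
-- def manual_incrementing_matrix(n):
--     vals = list(range(1, 2 * n))
--     return [vals[i:i + n] for i in range(n)]
-- ===== Notes on version B (the rewrite author's own statement) =====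
-- stated objective: alternative
-- what changed: B builds one arithmetic sequence 1..2n-1 and returns each row as an overlapping length-n slice (window) of it, so no per-cell value is ever computed and no counter is threaded through nested loops as in A.
import Mathlib
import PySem

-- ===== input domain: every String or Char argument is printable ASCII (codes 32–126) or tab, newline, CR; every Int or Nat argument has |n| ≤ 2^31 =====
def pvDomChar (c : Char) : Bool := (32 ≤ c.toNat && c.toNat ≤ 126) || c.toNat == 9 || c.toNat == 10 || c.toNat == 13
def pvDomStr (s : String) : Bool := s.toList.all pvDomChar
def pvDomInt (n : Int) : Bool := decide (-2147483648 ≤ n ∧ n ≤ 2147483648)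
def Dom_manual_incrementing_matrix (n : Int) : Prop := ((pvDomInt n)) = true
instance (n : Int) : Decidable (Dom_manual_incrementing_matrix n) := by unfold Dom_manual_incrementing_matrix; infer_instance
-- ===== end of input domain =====

-- B builds one arithmetic sequence 1..2n-1 and returns each row as an overlapping
-- length-n slice (window) of it, instead of A's pre-allocated None matrix filled
-- cell by cell via a threaded counter over nested loops (alternative decomposition).


-- ===== PORT A =====
-- the two nested loops: each row's cells are overwritten with counter + nested_idx,
-- counter incremented after every row
def mimLoop : List (Int × List (Option Int)) → Int → List (List Int)
  | [], _ => []
  | (_, el) :: rest, counter =>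
      ((PySem.List.enumerate el).map (fun p => counter + p.1)) :: mimLoop rest (counter + 1)

def manual_incrementing_matrix (n : Int) : List (List Int) :=
  let matrix : List (List (Option Int)) :=
    (PySem.List.pyRange 0 n 1).map (fun _ => (PySem.List.pyRange 0 n 1).map (fun _ => none))
  mimLoop (PySem.List.enumerate matrix) 1

-- ===== PORT B =====
def manual_incrementing_matrix_alt (n : Int) : List (List Int) :=
  let vals := PySem.List.pyRange 1 (2 * n) 1
  (PySem.List.pyRange 0 n 1).map (fun i => PySem.List.slice vals (some i) (some (i + n)))

-- ===== PRECONDITION & SPEC =====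
def Spec_manual_incrementing_matrix (n : Int) (out : List (List Int)) : Prop := out = manual_incrementing_matrix_alt n
instance (n : Int) (out : List (List Int)) : Decidable (Spec_manual_incrementing_matrix n out) := by unfold Spec_manual_incrementing_matrix; infer_instance

-- ===== CLAIM =====
def Claim_equal_manual_incrementing_matrix : Prop := ∀ (n : Int), Dom_manual_incrementing_matrix n → Spec_manual_incrementing_matrix n (manual_incrementing_matrix n)

-- ===== LEMMAS AND PROOFS =====

-- a single filled row of A: enumerate indices shifted by the counter
lemma mim_row (el : List (Option Int)) (s c : Int) :
    (PySem.List.enumerate el s).map (fun p => c + p.1)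
      = (List.range el.length).map (fun k : Nat => c + s + (k : Int)) := by
  induction el generalizing s with
  | nil => simp [PySem.List.enumerate_nil]
  | cons x xs ih =>
      rw [PySem.List.enumerate_cons, List.map_cons, ih (s + 1)]
      simp only [List.length_cons, List.range_succ_eq_map, List.map_cons, List.map_map,
        List.cons_eq_cons]
      refine ⟨by push_cast; ring, List.map_congr_left ?_⟩
      intro k _
      simp only [Function.comp]
      push_cast
      ring

-- the outer loop over identical rows is a plain counter recursion
lemma mim_loop (m : Nat) (r : List (Option Int)) (s c : Int) :
    mimLoop (PySem.List.enumerate (List.replicate m r) s) c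
      = (List.range m).map
          (fun i : Nat => (List.range r.length).map (fun k : Nat => (c + (i : Int)) + (k : Int))) := by
  induction m generalizing s c with
  | zero => simp [PySem.List.enumerate_nil, mimLoop]
  | succ m ih =>
      rw [List.replicate_succ, PySem.List.enumerate_cons, mimLoop, ih (s + 1) (c + 1),
        List.range_succ_eq_map, List.map_cons, List.map_map, mim_row]
      congr 1
      apply List.map_congr_left
      intro i _
      simp only [Function.comp]
      apply List.map_congr_left
      intro k _
      push_cast
      ring

-- a window of the base sequence is A's row
lemma mim_window (N k : Nat) (hk : k < N) :
    ((((List.range (2 * N - 1)).map (fun j : Nat => (1 : Int) + j)).drop k).take N)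
      = (List.range N).map (fun j : Nat => ((1 + (k : Int)) + (j : Int))) := by
  apply List.ext_getElem
  · simp; omega
  · intro i h1 h2
    have hi : i < N := by simpa using h2
    have hik : k + i < 2 * N - 1 := by omega
    simp [List.getElem_take, List.getElem_drop]
    ring

theorem mim_eq (n : Int) :
    manual_incrementing_matrix n = manual_incrementing_matrix_alt n := by
  simp only [manual_incrementing_matrix, manual_incrementing_matrix_alt,
    PySem.List.pyRange_one]
  have h1 : (n - 0).toNat = n.toNat := by omega
  rw [h1, List.map_const', List.length_map, List.length_range, mim_loop]
  simp only [List.length_map, List.length_range, List.map_map]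
  apply List.map_congr_left
  intro k hk
  have hk' : k < n.toNat := List.mem_range.mp hk
  have hn : 0 < n := by omega
  simp only [Function.comp]
  have hzk : (0 : Int) + (k : Int) = ((k : Nat) : Int) := by ring
  have hnn : ((k : Int) + n) = ((k : Int) + ((n.toNat : Nat) : Int)) := by omega
  rw [hzk, hnn, PySem.List.slice_natCast_add]
  have h2 : (2 * n - 1).toNat = 2 * n.toNat - 1 := by omega
  rw [h2, mim_window n.toNat k hk']

-- ===== VERDICT =====
theorem manual_incrementing_matrix_spec : Claim_equal_manual_incrementing_matrix := by
  intro n _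
  unfold Spec_manual_incrementing_matrix
  exact mim_eq n
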